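-- pv_equiv track=rewrite | github.com/simonhughes22/PythonNlpResearch | Clustering/ClustersToFile.py | aggregate_labels
-- ===== SOURCE A (Python) =====
-- from collections import defaultdict
--
-- def aggregate_labels(codes_per_document, lst_labels):
--     code_tally_by_cluster = defaultdict(lambda: defaultdict(int))
--     codes_per_cluster = defaultdict(list)
--
--     for i, labels in enumerate(lst_labels):
--         for label in labels:
--             for code in codes_per_document[i]:
--                 code_tally_by_cluster[label][code] = code_tally_by_cluster[label][code] + 1
--                 codes_per_cluster[label].append(code)
--
--     return (code_tally_by_cluster, codes_per_cluster)
-- ===== SOURCE B (Python) =====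
-- from collections import defaultdict
--
-- def aggregate_labels(codes_per_document, lst_labels):
--     # pass 1: build only the per-cluster code lists (zip pairs documents with labels)
--     codes_per_cluster = defaultdict(list)
--     for codes, labels in zip(codes_per_document, lst_labels):
--         if codes:
--             for label in labels:
--                 codes_per_cluster[label].extend(codes)
--     # pass 2: tally each cluster's list
--     code_tally_by_cluster = defaultdict(lambda: defaultdict(int))
--     for label, codes in codes_per_cluster.items():
--         tally = code_tally_by_cluster[label]
--         for code in codes:
--             tally[code] += 1
--     return (code_tally_by_cluster, codes_per_cluster)
-- ===== Notes on version B (the rewrite author's own statement) =====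
-- stated objective: alternative
-- what changed: A counts and appends in one interleaved triple-nested pass keyed by enumerate-index lookups; B first builds only the per-cluster code lists in a single zip pass (extending by whole code lists), then tallies each cluster's list in a separate second pass.
import Mathlib
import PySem

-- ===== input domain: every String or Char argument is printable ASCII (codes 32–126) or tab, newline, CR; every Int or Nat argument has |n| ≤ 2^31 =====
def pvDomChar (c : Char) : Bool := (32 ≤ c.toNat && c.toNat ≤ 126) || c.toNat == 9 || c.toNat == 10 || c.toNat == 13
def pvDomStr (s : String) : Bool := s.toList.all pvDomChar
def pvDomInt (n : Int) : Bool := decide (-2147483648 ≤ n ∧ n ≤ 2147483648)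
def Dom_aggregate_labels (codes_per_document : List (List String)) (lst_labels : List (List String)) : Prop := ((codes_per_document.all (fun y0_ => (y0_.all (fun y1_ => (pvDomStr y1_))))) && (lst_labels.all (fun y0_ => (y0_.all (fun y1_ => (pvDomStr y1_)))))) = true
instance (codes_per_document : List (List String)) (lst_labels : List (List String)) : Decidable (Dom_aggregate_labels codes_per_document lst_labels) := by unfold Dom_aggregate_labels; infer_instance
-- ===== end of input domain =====

-- B replaces A's interleaved triple-nested count-and-append pass by two separate passes
-- (build the per-cluster code lists first, then tally each list); same return value.
-- Dicts are PySem.Dict rendered as items lists (insertion order).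

-- ===== PORT A =====
-- A's single interleaved pass: for i, labels in enumerate(lst_labels): for label in labels:
-- for code in codes_per_document[i]: tally[label][code] += 1; clusters[label].append(code).
-- codes_per_document[i] is ported with pyGetD _ _ [] : the none/IndexError case is excluded by Pre_.
def aggregate_labels (codes_per_document : List (List String)) (lst_labels : List (List String)) : (List (String × List (String × Int))) × (List (String × List String)) :=
  let st : PySem.Dict String (PySem.Dict String Int) × PySem.Dict String (List String) :=
    (PySem.List.enumerate lst_labels).foldl (fun st p =>
      p.2.foldl (fun st label =>
        (PySem.List.pyGetD codes_per_document p.1 []).foldl (fun st code =>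
          (st.1.modify label PySem.Dict.empty (fun inner => inner.modify code 0 (· + 1)),
           st.2.modify label [] (· ++ [code]))) st) st)
      (PySem.Dict.empty, PySem.Dict.empty)
  (st.1.items.map (fun q => (q.1, q.2.items)), st.2.items)

-- ===== PORT B =====
-- pass 1 of Source B: zip documents with labels, extend clusters[label] by the whole codes list (skip empty codes)
def pvClustersB (codes_per_document : List (List String)) (lst_labels : List (List String)) : PySem.Dict String (List String) :=
  (codes_per_document.zip lst_labels).foldl (fun c p =>
    if p.1 ≠ [] then p.2.foldl (fun c label => c.modify label [] (· ++ p.1)) c else c)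
    PySem.Dict.empty

-- pass 2 of Source B: tally = code_tally_by_cluster[label]; for code in codes: tally[code] += 1
def pvTallyB (clusters : PySem.Dict String (List String)) : PySem.Dict String (PySem.Dict String Int) :=
  clusters.items.foldl (fun t q =>
    t.insert q.1 (q.2.foldl (fun d code => d.modify code 0 (· + 1)) (t.getD q.1 PySem.Dict.empty)))
    PySem.Dict.empty

def aggregate_labels_alt (codes_per_document : List (List String)) (lst_labels : List (List String)) : (List (String × List (String × Int))) × (List (String × List String)) :=
  let clusters := pvClustersB codes_per_document lst_labels
  let tally := pvTallyB clusters
  (tally.items.map (fun q => (q.1, q.2.items)), clusters.items)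

-- ===== PRECONDITION & SPEC =====
-- A raises IndexError exactly when some index with a non-empty label list is past the end of
-- codes_per_document; Pre_ demands every label list beyond that length be empty.
def Pre_aggregate_labels (codes_per_document : List (List String)) (lst_labels : List (List String)) : Prop :=
  ∀ l ∈ lst_labels.drop codes_per_document.length, l = []
instance (codes_per_document : List (List String)) (lst_labels : List (List String)) : Decidable (Pre_aggregate_labels codes_per_document lst_labels) := by unfold Pre_aggregate_labels; infer_instance

def pvWitness_aggregate_labels : List (List String) × List (List String) :=
  ([["c1", "c2"], ["c2"]], [["k1"], ["k1", "k2"]])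

def Spec_aggregate_labels (codes_per_document : List (List String)) (lst_labels : List (List String)) (out : (List (String × List (String × Int))) × (List (String × List String))) : Prop := out = aggregate_labels_alt codes_per_document lst_labels
instance (codes_per_document : List (List String)) (lst_labels : List (List String)) (out : (List (String × List (String × Int))) × (List (String × List String))) : Decidable (Spec_aggregate_labels codes_per_document lst_labels out) := by unfold Spec_aggregate_labels; infer_instance

-- ===== CLAIM (what is proved, stated in full; the proofs are below) =====
def Claim_equal_aggregate_labels : Prop := ∀ (codes_per_document : List (List String)) (lst_labels : List (List String)), Dom_aggregate_labels codes_per_document lst_labels → Pre_aggregate_labels codes_per_document lst_labels → Spec_aggregate_labels codes_per_document lst_labels (aggregate_labels codes_per_document lst_labels)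

-- ===== LEMMAS AND PROOFS =====

-- `mapCounter c` is the tally dict determined by the clusters dict: same keys in the same
-- order, each value the Counter of the code list.
def pvMapCounter (d : PySem.Dict String (List String)) : PySem.Dict String (PySem.Dict String Int) :=
  ⟨d.items.map (fun q => (q.1, PySem.Dict.counter q.2))⟩

theorem pvContains_mapCounter (d : PySem.Dict String (List String)) (k : String) :
    (pvMapCounter d).contains k = d.contains k := by
  simp [pvMapCounter, PySem.Dict.contains, List.any_map, Function.comp_def]

theorem pvGet?_mapCounter (d : PySem.Dict String (List String)) (k : String) :
    (pvMapCounter d).get? k = (d.get? k).map PySem.Dict.counter := by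
  simp [pvMapCounter, PySem.Dict.get?, List.find?_map, Function.comp_def]

theorem pvGetD_mapCounter (d : PySem.Dict String (List String)) (k : String) :
    (pvMapCounter d).getD k PySem.Dict.empty = PySem.Dict.counter (d.getD k []) := by
  rw [PySem.Dict.getD_eq_get?_getD, PySem.Dict.getD_eq_get?_getD, pvGet?_mapCounter]
  cases d.get? k <;> rfl

theorem pvInsert_mapCounter (d : PySem.Dict String (List String)) (k : String) (v : List String) :
    (pvMapCounter d).insert k (PySem.Dict.counter v) = pvMapCounter (d.insert k v) := by
  simp only [PySem.Dict.insert, pvContains_mapCounter]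
  split
  · apply PySem.Dict.ext
    simp only [pvMapCounter, List.map_map]
    apply List.map_congr_left
    intro p _
    by_cases h : p.1 = k <;> simp [h]
  · apply PySem.Dict.ext
    simp [pvMapCounter]

-- one (label, code) event commutes with mapCounter
theorem pvStep_commute (d : PySem.Dict String (List String)) (l c : String) :
    (pvMapCounter d).modify l PySem.Dict.empty (fun inner => inner.modify c 0 (· + 1))
      = pvMapCounter (d.modify l [] (· ++ [c])) := by
  have hc : (PySem.Dict.counter (d.getD l [])).insert c
      ((PySem.Dict.counter (d.getD l [])).getD c 0 + 1)
      = PySem.Dict.counter (d.getD l [] ++ [c]) := by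
    rw [PySem.Dict.counter_append_singleton]; rfl
  simp only [PySem.Dict.modify, pvGetD_mapCounter, hc, pvInsert_mapCounter]

-- a fold whose step commutes with mapCounter commutes with mapCounter
theorem pvFoldl_mapCounter {β : Type}
    (f : PySem.Dict String (PySem.Dict String Int) → β → PySem.Dict String (PySem.Dict String Int))
    (g : PySem.Dict String (List String) → β → PySem.Dict String (List String))
    (h : ∀ d b, f (pvMapCounter d) b = pvMapCounter (g d b)) :
    ∀ (L : List β) (d : PySem.Dict String (List String)),
      L.foldl f (pvMapCounter d) = pvMapCounter (L.foldl g d) := by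
  intro L
  induction L with
  | nil => intro d; rfl
  | cons b L ih => intro d; simp only [List.foldl_cons, h, ih]

-- a pair fold whose step is componentwise splits into the two component folds
theorem pvFoldl_pair {β σ₁ σ₂ : Type} (step : σ₁ × σ₂ → β → σ₁ × σ₂)
    (f : σ₁ → β → σ₁) (g : σ₂ → β → σ₂)
    (hstep : ∀ s b, step s b = (f s.1 b, g s.2 b)) :
    ∀ (L : List β) (s : σ₁ × σ₂), L.foldl step s = (L.foldl f s.1, L.foldl g s.2) := by
  intro L
  induction L with
  | nil => intro s; rfl
  | cons b L ih => intro s; rw [List.foldl_cons, ih, hstep]; rfl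

-- modify/modify fusion at the same key
theorem pvModify_modify (d : PySem.Dict String (List String)) (k : String) (f g : List String → List String) :
    (d.modify k [] f).modify k [] g = d.modify k [] (fun v => g (f v)) := by
  simp only [PySem.Dict.modify, PySem.Dict.getD_insert_self, PySem.Dict.insert_insert_self]

-- appending the codes one at a time = one extend (for non-empty codes)
theorem pvInner_fuse (l : String) :
    ∀ (codes : List String) (c : PySem.Dict String (List String)), codes ≠ [] →
      codes.foldl (fun c x => c.modify l [] (· ++ [x])) c = c.modify l [] (· ++ codes) := by
  intro codes
  induction codes with
  | nil => intro c h; exact absurd rfl h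
  | cons x rest ih =>
    intro c _
    by_cases hr : rest = []
    · subst hr; rfl
    · simp only [List.foldl_cons, ih _ hr, pvModify_modify]
      congr 1
      funext v
      simp

-- a fold whose every step is the identity collapses
theorem pvFoldl_id {β σ : Type} (f : σ → β → σ) (h : ∀ s b, f s b = s) :
    ∀ (L : List β) (s : σ), L.foldl f s = s := by
  intro L
  induction L with
  | nil => intro s; rfl
  | cons b L ih => intro s; rw [List.foldl_cons, h, ih]

theorem pvEnumerate_shift {α : Type} :
    ∀ (xs : List α) (n : Int), PySem.List.enumerate xs (n + 1)
      = (PySem.List.enumerate xs n).map (fun p => (p.1 + 1, p.2)) := by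
  intro xs
  induction xs with
  | nil => intro n; rfl
  | cons x t ih =>
    intro n
    simp only [PySem.List.enumerate, List.map_cons]
    rw [show n + 1 + 1 = (n + 1) + 1 by ring]
    exact congrArg _ (ih (n + 1))

theorem pvEnumerate_cons {α : Type} (x : α) (t : List α) (n : Int) :
    PySem.List.enumerate (x :: t) n = (n, x) :: PySem.List.enumerate t (n + 1) := rfl

theorem pvMem_enumerate_nonneg {α : Type} :
    ∀ (xs : List α) (n : Int) (p : Int × α), p ∈ PySem.List.enumerate xs n → n ≤ p.1 := by
  intro xs
  induction xs with
  | nil =>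
    intro n p h
    rw [show PySem.List.enumerate ([] : List α) n = [] from rfl] at h
    cases h
  | cons x t ih =>
    intro n p h
    rw [pvEnumerate_cons, List.mem_cons] at h
    rcases h with h | h
    · subst h; exact le_refl _
    · have := ih (n + 1) p h; omega

theorem pvGetD_succ {α : Type} (c0 : α) (cs : List α) (i : Int) (hi : 0 ≤ i) (dflt : α) :
    PySem.List.pyGetD (c0 :: cs) (i + 1) dflt = PySem.List.pyGetD cs i dflt := by
  obtain ⟨n, rfl⟩ := Int.eq_ofNat_of_zero_le hi
  rw [show ((n : Int) + 1) = ((n + 1 : Nat) : Int) by push_cast; ring]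
  rw [PySem.List.pyGetD_natCast, PySem.List.pyGetD_natCast]
  rfl

-- A's cluster loop over enumerate+index = B's cluster loop over zip
theorem pvOuter_eq (F : PySem.Dict String (List String) → List String → List String → PySem.Dict String (List String))
    (hF : ∀ c labels, F c [] labels = c) :
    ∀ (lst cpd : List (List String)) (c : PySem.Dict String (List String)),
      (PySem.List.enumerate lst).foldl (fun c p => F c (PySem.List.pyGetD cpd p.1 []) p.2) c
        = (cpd.zip lst).foldl (fun c p => F c p.1 p.2) c := by
  intro lst
  induction lst with
  | nil => intro cpd c; cases cpd <;> rfl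
  | cons labels rest ih =>
    intro cpd c
    cases cpd with
    | nil =>
      simp only [List.zip_nil_left, List.foldl_nil]
      apply pvFoldl_id
      intro s p
      have : PySem.List.pyGetD ([] : List (List String)) p.1 [] = [] := by
        simp [PySem.List.pyGetD, PySem.List.pyGet?, PySem.List.pyIdx?]
      rw [this, hF]
    | cons c0 cs =>
      simp only [pvEnumerate_cons, List.zip_cons_cons, List.foldl_cons]
      have h0 : PySem.List.pyGetD (c0 :: cs) (0 : Int) [] = c0 := by
        simp [pysem]
      rw [h0]
      rw [show (0 : Int) + 1 = 0 + 1 by ring, pvEnumerate_shift rest 0, List.foldl_map]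
      rw [← ih cs (F c c0 labels)]
      apply PySem.List.foldl_congr_mem
      intro acc p hp
      rw [pvGetD_succ _ _ _ (pvMem_enumerate_nonneg rest 0 p hp)]

-- clusters keys stay Nodup through B's pass 1
theorem pvNodup_clusters (codes_per_document lst_labels : List (List String)) :
    (pvClustersB codes_per_document lst_labels).keys.Nodup := by
  unfold pvClustersB
  generalize codes_per_document.zip lst_labels = L
  have h0 : (PySem.Dict.empty : PySem.Dict String (List String)).keys.Nodup :=
    PySem.Dict.nodup_keys_empty
  generalize (PySem.Dict.empty : PySem.Dict String (List String)) = d at h0 ⊢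
  induction L generalizing d with
  | nil => exact h0
  | cons p L ih =>
    rw [List.foldl_cons]
    apply ih
    split
    · exact PySem.Dict.nodup_keys_foldl_modify_key p.2 id [] (fun d l => (· ++ p.1)) d h0
    · exact h0

-- B's pass 2 over a Nodup-keyed clusters dict is exactly mapCounter
theorem pvTallyB_items :
    ∀ (ps : List (String × List String)) (t : PySem.Dict String (PySem.Dict String Int)),
      (∀ q ∈ ps, t.contains q.1 = false) → (ps.map Prod.fst).Nodup →
      (ps.foldl (fun t q =>
          t.insert q.1 (q.2.foldl (fun d code => d.modify code 0 (· + 1)) (t.getD q.1 PySem.Dict.empty))) t).items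
        = t.items ++ ps.map (fun q => (q.1, PySem.Dict.counter q.2)) := by
  intro ps
  induction ps with
  | nil => intro t _ _; simp
  | cons q ps ih =>
    intro t hfresh hnd
    simp only [List.map_cons, List.nodup_cons] at hnd
    have hq : t.contains q.1 = false := hfresh q (List.mem_cons_self ..)
    have hget : t.getD q.1 PySem.Dict.empty = PySem.Dict.empty :=
      PySem.Dict.getD_of_not_contains t PySem.Dict.empty hq
    rw [List.foldl_cons, hget, ← PySem.Dict.counter_eq_foldl]
    rw [ih]
    · rw [PySem.Dict.items_insert_of_not_contains _ _ hq]
      simp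
    · intro r hr
      rw [PySem.Dict.contains_insert]
      have h1 : (r.1 == q.1) = false := by
        simp only [beq_eq_false_iff_ne, ne_eq]
        intro hcontra
        exact hnd.1 (hcontra ▸ List.mem_map_of_mem hr)
      rw [h1, hfresh r (List.mem_cons_of_mem _ hr), Bool.or_self]
    · exact hnd.2

theorem pvTallyB_eq_mapCounter (clusters : PySem.Dict String (List String))
    (h : clusters.keys.Nodup) : pvTallyB clusters = pvMapCounter clusters := by
  apply PySem.Dict.ext
  unfold pvTallyB
  rw [pvTallyB_items clusters.items PySem.Dict.empty (fun _ _ => PySem.Dict.contains_empty _) h]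
  rfl

-- A's cluster component equals B's pass-1 clusters
theorem pvClusters_eq (codes_per_document lst_labels : List (List String)) :
    (PySem.List.enumerate lst_labels).foldl (fun c p =>
        p.2.foldl (fun c label =>
          (PySem.List.pyGetD codes_per_document p.1 []).foldl
            (fun c code => c.modify label [] (· ++ [code])) c) c)
      PySem.Dict.empty
      = pvClustersB codes_per_document lst_labels := by
  unfold pvClustersB
  rw [pvOuter_eq (fun c codes labels =>
        labels.foldl (fun c label => codes.foldl (fun c code => c.modify label [] (· ++ [code])) c) c)
      (by intro c labels; exact pvFoldl_id _ (fun s b => rfl) labels c)]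
  apply PySem.List.foldl_congr_mem
  intro c p _
  by_cases h : p.1 = []
  · rw [if_neg (by simp [h])]
    simp only [h, List.foldl_nil]
    exact pvFoldl_id _ (fun s b => rfl) p.2 c
  · rw [if_pos (by simp [h])]
    apply PySem.List.foldl_congr_mem
    intro c' l _
    exact pvInner_fuse l p.1 c' h

-- ===== VERDICT (by name: the statement is the Claim_ definition above) =====
theorem aggregate_labels_spec : Claim_equal_aggregate_labels := by
  intro cpd lst _ _
  unfold Spec_aggregate_labels aggregate_labels aggregate_labels_alt
  have hsplit :
      (PySem.List.enumerate lst).foldl (fun st p =>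
        p.2.foldl (fun st label =>
          (PySem.List.pyGetD cpd p.1 []).foldl (fun st code =>
            (st.1.modify label PySem.Dict.empty (fun inner => inner.modify code 0 (· + 1)),
             st.2.modify label [] (· ++ [code]))) st) st)
        ((PySem.Dict.empty : PySem.Dict String (PySem.Dict String Int)),
         (PySem.Dict.empty : PySem.Dict String (List String)))
      = ((PySem.List.enumerate lst).foldl (fun t p =>
            p.2.foldl (fun t label =>
              (PySem.List.pyGetD cpd p.1 []).foldl
                (fun t code => t.modify label PySem.Dict.empty (fun inner => inner.modify code 0 (· + 1))) t) t)
            PySem.Dict.empty,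
         (PySem.List.enumerate lst).foldl (fun c p =>
            p.2.foldl (fun c label =>
              (PySem.List.pyGetD cpd p.1 []).foldl
                (fun c code => c.modify label [] (· ++ [code])) c) c)
            PySem.Dict.empty) := by
    exact pvFoldl_pair _
      (fun (t : PySem.Dict String (PySem.Dict String Int)) (p : Int × List String) =>
        p.2.foldl (fun t label => (PySem.List.pyGetD cpd p.1 []).foldl
        (fun t code => t.modify label PySem.Dict.empty (fun inner => inner.modify code 0 (· + 1))) t) t)
      (fun (c : PySem.Dict String (List String)) (p : Int × List String) =>
        p.2.foldl (fun c label => (PySem.List.pyGetD cpd p.1 []).foldl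
        (fun c code => c.modify label [] (· ++ [code])) c) c)
      (fun st p => pvFoldl_pair _
        (fun (t : PySem.Dict String (PySem.Dict String Int)) (label : String) =>
          (PySem.List.pyGetD cpd p.1 []).foldl
          (fun t code => t.modify label PySem.Dict.empty (fun inner => inner.modify code 0 (· + 1))) t)
        (fun (c : PySem.Dict String (List String)) (label : String) =>
          (PySem.List.pyGetD cpd p.1 []).foldl
          (fun c code => c.modify label [] (· ++ [code])) c)
        (fun st' label => pvFoldl_pair _
          (fun (t : PySem.Dict String (PySem.Dict String Int)) (code : String) =>
            t.modify label PySem.Dict.empty (fun inner => inner.modify code 0 (· + 1)))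
          (fun (c : PySem.Dict String (List String)) (code : String) =>
            c.modify label [] (· ++ [code]))
          (fun st'' code => rfl) _ st')
        p.2 st) _ _
  have hT :
      (PySem.List.enumerate lst).foldl (fun t p =>
          p.2.foldl (fun t label =>
            (PySem.List.pyGetD cpd p.1 []).foldl
              (fun t code => t.modify label PySem.Dict.empty (fun inner => inner.modify code 0 (· + 1))) t) t)
        PySem.Dict.empty
      = pvMapCounter ((PySem.List.enumerate lst).foldl (fun c p =>
          p.2.foldl (fun c label =>
            (PySem.List.pyGetD cpd p.1 []).foldl
              (fun c code => c.modify label [] (· ++ [code])) c) c)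
        PySem.Dict.empty) := by
    have : (PySem.Dict.empty : PySem.Dict String (PySem.Dict String Int))
        = pvMapCounter PySem.Dict.empty := rfl
    rw [this]
    apply pvFoldl_mapCounter
    intro d p
    apply pvFoldl_mapCounter
    intro d' label
    apply pvFoldl_mapCounter
    intro d'' code
    exact pvStep_commute d'' label code
  simp only [hsplit, hT, pvClusters_eq, pvTallyB_eq_mapCounter _ (pvNodup_clusters cpd lst)]
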